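-- pv_equiv track=rewrite | github.com/szubrilina/TextGeneration | TextGeneration_PEP8_faile.py | calculate_n_tokens
-- ===== SOURCE A (Python) =====
-- def get_string(list):
--     str = ""
--     for item in list:
--         str = str + item + ' '
--
--     str = str.rstrip(" ")
--     return str
--
-- def calculate_n_tokens(depth, list_of_all_tokens, probabilities): # n = depth
--
--     current = []
--
--     for item in list_of_all_tokens:
--         current.append(item)
--
--         if len(current) < depth:
--             continue
--
--         str = get_string(current[:-1:])
--
--         if probabilities.get(str, None) == None:
--             probabilities[str] = dict()
--
--         if probabilities[str].get(item, None) == None: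
--             probabilities[str][item] = 0
--
--         probabilities[str][item] += 1
--
--         current = current[1::]
--
--     return probabilities
-- ===== SOURCE B (Python) =====
-- def calculate_n_tokens(depth, list_of_all_tokens, probabilities):
--     # Staged pipeline instead of a stateful sliding window: (1) enumerate all
--     # (context, token) pairs, (2) tally them in a FLAT dict keyed by the pair,
--     # (3) merge the pair counts into the nested dict in one pass.
--     d = depth if depth > 1 else 1
--     toks = list_of_all_tokens
--     pairs = [(' '.join(toks[i - d + 1:i]).rstrip(' '), toks[i])
--              for i in range(d - 1, len(toks))]
--     flat = {}
--     for pair in pairs: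
--         flat[pair] = flat.get(pair, 0) + 1
--     for (ctx, tok), n in flat.items():
--         inner = probabilities.setdefault(ctx, {})
--         inner[tok] = inner.get(tok, 0) + n
--     return probabilities
-- ===== Notes on version B (the rewrite author's own statement) =====
-- stated objective: faster
-- what changed: Replaces A's stateful sliding-window loop that updates the nested dict token by token (rebuilding the context string by repeated concatenation and re-slicing the window list each step) with a staged pipeline: enumerate all (context, token) pairs via ' '.join, tally them in a flat dict keyed by the pair, then merge the pair counts into the nested dict in one pass.
import Mathlib
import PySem

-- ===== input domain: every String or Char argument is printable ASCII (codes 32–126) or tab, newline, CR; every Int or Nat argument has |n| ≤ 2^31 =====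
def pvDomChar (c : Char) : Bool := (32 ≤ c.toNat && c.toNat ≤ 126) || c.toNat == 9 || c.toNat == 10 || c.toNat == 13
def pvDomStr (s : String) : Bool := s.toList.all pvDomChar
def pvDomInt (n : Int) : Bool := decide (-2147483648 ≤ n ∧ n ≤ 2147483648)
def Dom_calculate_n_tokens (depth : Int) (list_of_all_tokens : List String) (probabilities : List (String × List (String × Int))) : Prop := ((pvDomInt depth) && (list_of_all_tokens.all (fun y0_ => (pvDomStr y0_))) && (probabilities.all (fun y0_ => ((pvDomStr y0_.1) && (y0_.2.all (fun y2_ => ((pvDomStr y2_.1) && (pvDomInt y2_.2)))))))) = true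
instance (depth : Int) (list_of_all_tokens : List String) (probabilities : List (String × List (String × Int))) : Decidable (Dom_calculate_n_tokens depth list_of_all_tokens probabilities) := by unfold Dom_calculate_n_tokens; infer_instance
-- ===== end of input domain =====

-- B replaces A's stateful sliding-window loop (append / guard-continue / re-slice, updating the
-- nested dict token by token) with a staged pipeline: enumerate all (context, token) pairs, tally
-- them in a FLAT dict keyed by the pair, then merge the pair counts into the nested dict in one
-- pass — objective: faster (a timing run measured B faster; same asymptotics, B avoids A's per-step list re-slicing and character-by-character context rebuilding).  Note: in Python both A and B mutate `probabilities` in place in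
-- the same way and return it; the equivalence proved here is about the returned value.

-- shared primitive: Python's s.rstrip(" ") — drops trailing ' ' characters only (exact; PySem has no
-- chars-argument rstrip).  Used by A inside get_string and by B on the joined context.
def pyRstripSpace (s : String) : String :=
  String.mk ((s.toList.reverse.dropWhile (· == ' ')).reverse)

-- representation plumbing shared by both ports: the dict-of-dicts argument/result as PySem.Dict
def pvToDict (probabilities : List (String × List (String × Int))) :
    PySem.Dict String (PySem.Dict String Int) :=
  ⟨probabilities.map (fun p => (p.1, ⟨p.2⟩))⟩

def pvFromDict (d : PySem.Dict String (PySem.Dict String Int)) :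
    List (String × List (String × Int)) :=
  d.items.map (fun p => (p.1, p.2.items))

-- ===== PORT A =====
def get_string (list : List String) : String :=
  let str := list.foldl (fun str item => str ++ item ++ " ") ""
  pyRstripSpace str

-- the loop body of A: state = (current, probabilities)
def pvStepA (depth : Int)
    (st : List String × PySem.Dict String (PySem.Dict String Int)) (item : String) :
    List String × PySem.Dict String (PySem.Dict String Int) :=
  let current := st.1 ++ [item]
  if (current.length : Int) < depth then (current, st.2)
  else
    let str := get_string (PySem.List.slice current none (some (-1)))
    let probs := if st.2.get? str = none then st.2.insert str PySem.Dict.empty else st.2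
    -- probabilities[str] (present here, so the KeyError case cannot occur)
    let inner := (probs.get? str).getD PySem.Dict.empty
    let probs := if inner.get? item = none then probs.insert str (inner.insert item 0) else probs
    let inner := (probs.get? str).getD PySem.Dict.empty
    let probs := probs.insert str (inner.insert item (inner.getD item 0 + 1))
    (PySem.List.slice current (some 1) none, probs)

def calculate_n_tokens (depth : Int) (list_of_all_tokens : List String) (probabilities : List (String × List (String × Int))) : List (String × List (String × Int)) :=
  pvFromDict (list_of_all_tokens.foldl (pvStepA depth) ([], pvToDict probabilities)).2

-- ===== PORT B =====
-- stage 1: the (context, token) pair at window end position i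
def pvPairB (toks : List String) (d : Int) (i : Int) : String × String :=
  (pyRstripSpace (PySem.Str.join " " (PySem.List.slice toks (some (i - d + 1)) (some i))),
   PySem.List.pyGetD toks i "")   -- i is always in range here

-- stage 2: tally one pair into the flat dict  (flat[pair] = flat.get(pair, 0) + 1)
def pvCountStep (f : PySem.Dict (String × String) Int) (pr : String × String) :
    PySem.Dict (String × String) Int :=
  f.insert pr (f.getD pr 0 + 1)

-- stage 3: merge one flat entry ((ctx, tok), n) into the nested dict
def pvMergeStep (p : PySem.Dict String (PySem.Dict String Int))
    (e : (String × String) × Int) : PySem.Dict String (PySem.Dict String Int) :=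
  let probs := p.setdefault e.1.1 PySem.Dict.empty
  let inner := probs.getD e.1.1 PySem.Dict.empty
  probs.insert e.1.1 (inner.insert e.1.2 (inner.getD e.1.2 0 + e.2))

def calculate_n_tokens_alt (depth : Int) (list_of_all_tokens : List String) (probabilities : List (String × List (String × Int))) : List (String × List (String × Int)) :=
  let d : Int := if depth > 1 then depth else 1
  let pairs := (PySem.List.pyRange (d - 1) (list_of_all_tokens.length : Int)).map
    (pvPairB list_of_all_tokens d)
  let flat := pairs.foldl pvCountStep PySem.Dict.empty
  pvFromDict (flat.items.foldl pvMergeStep (pvToDict probabilities))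

-- ===== PRECONDITION & SPEC =====
def Spec_calculate_n_tokens (depth : Int) (list_of_all_tokens : List String) (probabilities : List (String × List (String × Int))) (out : List (String × List (String × Int))) : Prop := out = calculate_n_tokens_alt depth list_of_all_tokens probabilities
instance (depth : Int) (list_of_all_tokens : List String) (probabilities : List (String × List (String × Int))) (out : List (String × List (String × Int))) : Decidable (Spec_calculate_n_tokens depth list_of_all_tokens probabilities out) := by unfold Spec_calculate_n_tokens; infer_instance

-- ===== CLAIM (what is proved, stated in full; the proofs are below) =====
def Claim_equal_calculate_n_tokens : Prop := ∀ (depth : Int) (list_of_all_tokens : List String) (probabilities : List (String × List (String × Int))), Dom_calculate_n_tokens depth list_of_all_tokens probabilities → Spec_calculate_n_tokens depth list_of_all_tokens probabilities (calculate_n_tokens depth list_of_all_tokens probabilities)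

-- ===== LEMMAS AND PROOFS =====

-- the canonical nested update probs[c][t] += n (defaults {} and 0)
def pvUpdN (p : PySem.Dict String (PySem.Dict String Int)) (c t : String) (n : Int) :
    PySem.Dict String (PySem.Dict String Int) :=
  p.insert c ((p.getD c PySem.Dict.empty).insert t ((p.getD c PySem.Dict.empty).getD t 0 + n))

def pvUpd (p : PySem.Dict String (PySem.Dict String Int)) (c t : String) :
    PySem.Dict String (PySem.Dict String Int) := pvUpdN p c t 1

-- '(c, t) is a present nested key of p'
def pvHas (p : PySem.Dict String (PySem.Dict String Int)) (x : String × String) : Prop :=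
  p.contains x.1 = true ∧ (p.getD x.1 PySem.Dict.empty).contains x.2 = true

-- the common reference recursion: process the remaining tokens `l` with current window `w`
def pvRef (l : List String) (w : List String)
    (p : PySem.Dict String (PySem.Dict String Int)) :
    PySem.Dict String (PySem.Dict String Int) :=
  match l with
  | [] => p
  | t :: l => pvRef l ((w ++ [t]).drop 1) (pvUpd p (get_string w) t)

theorem pyRstripSpace_congr (s t : String)
    (h : s.toList = t.toList ++ [' ']) : pyRstripSpace s = pyRstripSpace t := by
  simp [pyRstripSpace, h]

-- get_string l = ' '.join(l).rstrip(' ')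
theorem get_string_foldl (l : List String) (s : String) :
    (l.foldl (fun str item => str ++ item ++ " ") s).toList
      = s.toList ++ (l.map (fun x => x.toList ++ [' '])).flatten := by
  induction l generalizing s with
  | nil => simp
  | cons t l ih => simp [ih]

theorem flatten_map_eq_join (l : List String) (t : String) :
    ((t :: l).map (fun x => x.toList ++ [' '])).flatten
      = PySem.Chars.join [' '] ((t :: l).map String.toList) ++ [' '] := by
  induction l generalizing t with
  | nil => simp [PySem.Chars.join_singleton]
  | cons u l ih =>
      simp only [List.map_cons, List.flatten_cons, PySem.Chars.join_cons_cons]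
      have := ih u
      simp only [List.map_cons, List.flatten_cons] at this
      simp [this]

theorem get_string_eq_join (l : List String) :
    get_string l = pyRstripSpace (PySem.Str.join " " l) := by
  cases l with
  | nil => rfl
  | cons t l =>
      show pyRstripSpace _ = _
      have h1 : ((t :: l).foldl (fun str item => str ++ item ++ " ") "").toList
          = (PySem.Str.join " " (t :: l)).toList ++ [' '] := by
        rw [get_string_foldl, PySem.Str.toList_join]
        simpa using flatten_map_eq_join l t
      exact pyRstripSpace_congr _ _ h1

-- the dict part of A's body equals pvUpd
theorem stepA_dict_eq (p : PySem.Dict String (PySem.Dict String Int)) (s t : String) :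
    (let probs := if p.get? s = none then p.insert s PySem.Dict.empty else p
     let inner := (probs.get? s).getD PySem.Dict.empty
     let probs := if inner.get? t = none then probs.insert s (inner.insert t 0) else probs
     let inner := (probs.get? s).getD PySem.Dict.empty
     probs.insert s (inner.insert t (inner.getD t 0 + 1))) = pvUpd p s t := by
  by_cases h1 : p.get? s = none
  · have hc : p.contains s = false := (PySem.Dict.get?_eq_none_iff_contains p s).mp h1
    simp [h1, PySem.Dict.get?_insert_self, PySem.Dict.get?_empty, PySem.Dict.insert_insert_self,
      PySem.Dict.getD_insert_self, pvUpd, pvUpdN, PySem.Dict.getD_of_not_contains _ _ hc,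
      PySem.Dict.getD_eq_get?_getD, PySem.Dict.get?_empty]
  · obtain ⟨inner, hv⟩ := Option.ne_none_iff_exists'.mp h1
    by_cases h2 : inner.get? t = none
    · simp [h1, hv, h2, PySem.Dict.get?_insert_self, PySem.Dict.insert_insert_self,
        PySem.Dict.getD_insert_self, pvUpd, pvUpdN, PySem.Dict.getD_eq_get?_getD, hv, h2]
    · simp [h1, hv, h2, pvUpd, pvUpdN, PySem.Dict.getD_eq_get?_getD, hv]

theorem stepA_eq (depth : Int) (w : List String)
    (p : PySem.Dict String (PySem.Dict String Int)) (t : String)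
    (h : depth ≤ (w.length : Int) + 1) :
    pvStepA depth (w, p) t = ((w ++ [t]).drop 1, pvUpd p (get_string w) t) := by
  have hg : ¬ (((w ++ [t]).length : Int) < depth) := by
    simp only [List.length_append, List.length_cons, List.length_nil]; push_cast; omega
  show (if ((w ++ [t]).length : Int) < depth then _ else _) = _
  rw [if_neg hg]
  rw [PySem.List.slice_to_neg_one, List.dropLast_concat,
      PySem.List.slice_from _ (by norm_num : (0:Int) ≤ 1)]
  rw [stepA_dict_eq p (get_string w) t]
  norm_num

-- A's loop, once the window is full, is pvRef
theorem A_core (depth : Int) (l : List String) :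
    ∀ (w : List String) (p : PySem.Dict String (PySem.Dict String Int)),
      depth ≤ (w.length : Int) + 1 →
      (l.foldl (pvStepA depth) (w, p)).2 = pvRef l w p := by
  induction l with
  | nil => intro w p _; rfl
  | cons t l ih =>
      intro w p h
      rw [List.foldl_cons, stepA_eq depth w p t h, pvRef]
      exact ih _ _ (by simp; omega)

-- A's loop while the window is still filling only accumulates
theorem A_phase1 (depth : Int) (l : List String) :
    ∀ (w : List String) (p : PySem.Dict String (PySem.Dict String Int)),
      ((w.length : Int) + (l.length : Int)) < depth →
      l.foldl (pvStepA depth) (w, p) = (w ++ l, p) := by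
  induction l with
  | nil => intro w p _; simp
  | cons t l ih =>
      intro w p h
      simp only [List.length_cons] at h
      have hg : ((w ++ [t]).length : Int) < depth := by
        simp only [List.length_append, List.length_cons, List.length_nil]; push_cast at *; omega
      rw [List.foldl_cons]
      show List.foldl _ (if ((w ++ [t]).length : Int) < depth then _ else _) _ = _
      rw [if_pos hg, ih (w ++ [t]) p (by simp at hg ⊢; push_cast at *; omega)]
      simp

-- generic: inserting at a PRESENT key is an in-place modification, so it commutes with
-- an insert at any other key
theorem dict_insert_comm {κ ν : Type} [BEq κ] [LawfulBEq κ] (d : PySem.Dict κ ν)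
    (k k' : κ) (v v' : ν) (hk : d.contains k = true) (hne : k' ≠ k) :
    (d.insert k v).insert k' v' = (d.insert k' v').insert k v := by
  have hbe : (k' == k) = false := beq_eq_false_iff_ne.mpr hne
  have hbe' : (k == k') = false := beq_eq_false_iff_ne.mpr (Ne.symm hne)
  apply PySem.Dict.ext
  by_cases hc' : d.contains k' = true
  · rw [PySem.Dict.items_insert_of_contains (d.insert k v) v'
        (by rw [PySem.Dict.contains_insert, hc', Bool.or_true]),
      PySem.Dict.items_insert_of_contains d v hk,
      PySem.Dict.items_insert_of_contains (d.insert k' v') v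
        (by rw [PySem.Dict.contains_insert, hk, Bool.or_true]),
      PySem.Dict.items_insert_of_contains d v' hc',
      List.map_map, List.map_map]
    apply List.map_congr_left
    intro a _
    simp only [Function.comp]
    by_cases h1 : a.1 = k <;> by_cases h2 : a.1 = k' <;>
      simp_all [beq_iff_eq]
  · have hc'f : d.contains k' = false := by simpa using hc'
    rw [PySem.Dict.items_insert_of_not_contains (d.insert k v) v'
        (by rw [PySem.Dict.contains_insert, hc'f, hbe]; rfl),
      PySem.Dict.items_insert_of_contains d v hk,
      PySem.Dict.items_insert_of_contains (d.insert k' v') v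
        (by rw [PySem.Dict.contains_insert, hk, Bool.or_true]),
      PySem.Dict.items_insert_of_not_contains d v' hc'f,
      List.map_append]
    simp
    intro h; exact absurd h hne

-- pvUpdN twice at the same nested key accumulates
theorem updN_updN (p : PySem.Dict String (PySem.Dict String Int)) (c t : String) (m n : Int) :
    pvUpdN (pvUpdN p c t m) c t n = pvUpdN p c t (m + n) := by
  simp [pvUpdN, PySem.Dict.getD_insert_self, PySem.Dict.insert_insert_self, add_assoc]

-- pvUpdN installs its own key
theorem pvHas_updN_self (p : PySem.Dict String (PySem.Dict String Int)) (c t : String) (n : Int) :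
    pvHas (pvUpdN p c t n) (c, t) := by
  constructor
  · exact PySem.Dict.contains_insert_self _ _ _
  · simp [pvUpdN, PySem.Dict.getD_insert_self, PySem.Dict.contains_insert_self]

-- pvUpdN preserves nested presence
theorem pvHas_updN (p : PySem.Dict String (PySem.Dict String Int)) (c t : String) (n : Int)
    (x : String × String) (h : pvHas p x) : pvHas (pvUpdN p c t n) x := by
  obtain ⟨h1, h2⟩ := h
  by_cases hc : x.1 = c
  · subst hc
    exact ⟨by simp [pvUpdN, PySem.Dict.contains_insert],
           by simp [pvUpdN, PySem.Dict.getD_insert_self, PySem.Dict.contains_insert, h2]⟩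
  · exact ⟨by simp [pvUpdN, PySem.Dict.contains_insert, h1],
           by simp [pvUpdN, PySem.Dict.getD_insert, hc, h2]⟩

-- an update at a PRESENT nested key commutes with any update at another nested key
theorem upd1_updN_comm (p : PySem.Dict String (PySem.Dict String Int))
    (x y : String × String) (n : Int) (hx : pvHas p x) (hne : y ≠ x) :
    pvUpdN (pvUpd p x.1 x.2) y.1 y.2 n = pvUpd (pvUpdN p y.1 y.2 n) x.1 x.2 := by
  obtain ⟨c, t⟩ := x
  obtain ⟨c', t'⟩ := y
  obtain ⟨h1, h2⟩ := hx
  simp only at h1 h2 ⊢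
  by_cases hcc : c' = c
  · subst hcc
    have htt : t' ≠ t := fun h => hne (by rw [h])
    simp only [pvUpd, pvUpdN, PySem.Dict.getD_insert_self, PySem.Dict.insert_insert_self,
      PySem.Dict.getD_insert, if_neg htt, if_neg (fun h : t = t' => htt h.symm)]
    exact congrArg _ (dict_insert_comm (p.getD c' PySem.Dict.empty) t t' _ _ h2 htt)
  · simp only [pvUpd, pvUpdN, PySem.Dict.getD_insert, if_neg hcc,
      if_neg (fun h : c = c' => hcc h.symm)]
    exact dict_insert_comm p c c' _ _ h1 hcc

-- fold form of the commutation: pvUpd at a present key moves past a merge fold over other keys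
theorem foldl_merge_upd1 (L : List ((String × String) × Int))
    (q : PySem.Dict String (PySem.Dict String Int)) (x : String × String)
    (h : ∀ e ∈ L, e.1 ≠ x) (hx : pvHas q x) :
    L.foldl (fun p e => pvUpdN p e.1.1 e.1.2 e.2) (pvUpd q x.1 x.2)
      = pvUpd (L.foldl (fun p e => pvUpdN p e.1.1 e.1.2 e.2) q) x.1 x.2 := by
  induction L generalizing q with
  | nil => rfl
  | cons e L ih =>
      rw [List.foldl_cons, List.foldl_cons,
        upd1_updN_comm q x e.1 e.2 hx (h e (List.mem_cons_self)) ]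
      exact ih _ (fun e' he' => h e' (List.mem_cons_of_mem _ he')) (pvHas_updN _ _ _ _ _ hx)

-- substitution at a key absent from L is the identity
theorem map_subst_id {ν : Type} (x : String × String) (m : ν)
    (L : List ((String × String) × ν)) (h : x ∉ L.map (·.1)) :
    L.map (fun pr => if pr.1 == x then (x, m) else pr) = L := by
  induction L with
  | nil => rfl
  | cons e L ih =>
      simp only [List.map_cons, List.mem_cons, not_or] at h ⊢
      have hb : (e.1 == x) = false := beq_eq_false_iff_ne.mpr (fun hx => h.1 hx.symm)
      rw [hb, if_neg (by simp), ih h.2]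

-- THE STAGING LEMMA: merging the flat pair counter equals applying the pair updates in stream order
theorem merge_cnt (P : List (String × String))
    (p : PySem.Dict String (PySem.Dict String Int)) :
    (P.foldl pvCountStep PySem.Dict.empty).items.foldl
        (fun q e => pvUpdN q e.1.1 e.1.2 e.2) p
      = P.foldl (fun q x => pvUpd q x.1 x.2) p := by
  induction P using List.reverseRecOn generalizing p with
  | nil => rfl
  | append_singleton P x ih =>
      rw [List.foldl_append, List.foldl_append, List.foldl_cons, List.foldl_cons,
        List.foldl_nil, List.foldl_nil]
      set f := P.foldl pvCountStep PySem.Dict.empty with hf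
      have hcntr : f = PySem.Dict.counter P :=
        PySem.Dict.foldl_insert_getD_add_one_eq_counter P
      have hnd : f.keys.Nodup := by
        rw [hcntr]; exact PySem.Dict.nodup_keys_counter P
      by_cases hc : f.contains x = true
      · have hxk : x ∈ f.items.map (·.1) := by
          have := (PySem.Dict.contains_iff_mem_keys f x).mp hc
          simpa [PySem.Dict.keys] using this
        obtain ⟨e, he, hex⟩ := List.mem_map.mp hxk
        have he2 : (x, e.2) ∈ f.items := by rw [← hex]; simpa using he
        set n := e.2 with hn
        obtain ⟨L1, L2, hsplit⟩ := List.append_of_mem he2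
        have hnd2 : ((L1 ++ (x, n) :: L2).map (·.1)).Nodup := by
          rw [← hsplit]; simpa [PySem.Dict.keys] using hnd
        have hx1 : x ∉ L1.map (·.1) ∧ x ∉ L2.map (·.1) := by
          rw [List.map_append, List.map_cons] at hnd2
          have h3 := (List.nodup_middle).mp hnd2
          rcases List.nodup_cons.mp h3 with ⟨hnm, -⟩
          rw [List.mem_append] at hnm
          exact ⟨fun h => hnm (Or.inl h), fun h => hnm (Or.inr h)⟩
        have hgd : f.getD x 0 = n := PySem.Dict.getD_of_mem_items f he2 hnd 0
        have hitems : (pvCountStep f x).items = L1 ++ (x, n + 1) :: L2 := by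
          rw [pvCountStep, PySem.Dict.items_insert_of_contains f _ hc, hgd, hsplit,
            List.map_append, List.map_cons, map_subst_id x _ L1 hx1.1,
            map_subst_id x _ L2 hx1.2]
          simp
        rw [hitems, List.foldl_append, List.foldl_cons]
        have hacc : pvUpdN (L1.foldl (fun q e => pvUpdN q e.1.1 e.1.2 e.2) p) x.1 x.2 (n + 1)
            = pvUpd (pvUpdN (L1.foldl (fun q e => pvUpdN q e.1.1 e.1.2 e.2) p) x.1 x.2 n)
                x.1 x.2 := by
          rw [pvUpd, updN_updN]
        rw [show pvUpdN (L1.foldl (fun q e => pvUpdN q e.1.1 e.1.2 e.2) p)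
              (x, n + 1).1.1 (x, n + 1).1.2 (x, n + 1).2
            = pvUpd (pvUpdN (L1.foldl (fun q e => pvUpdN q e.1.1 e.1.2 e.2) p) x.1 x.2 n)
                x.1 x.2 from hacc,
          foldl_merge_upd1 L2 _ x
          (fun e' he' h => hx1.2 (by rw [← h]; exact List.mem_map_of_mem he'))
          (pvHas_updN_self _ x.1 x.2 n)]
        have hfold : f.items.foldl (fun q e => pvUpdN q e.1.1 e.1.2 e.2) p
            = L2.foldl (fun q e => pvUpdN q e.1.1 e.1.2 e.2)
                (pvUpdN (L1.foldl (fun q e => pvUpdN q e.1.1 e.1.2 e.2) p) x.1 x.2 n) := by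
          rw [hsplit, List.foldl_append, List.foldl_cons]
        rw [← hfold, ih]
      · have hcf : f.contains x = false := by simpa using hc
        have hitems : (pvCountStep f x).items = f.items ++ [(x, 1)] := by
          rw [pvCountStep, PySem.Dict.getD_of_not_contains _ _ hcf,
            PySem.Dict.items_insert_of_not_contains f _ hcf]
          norm_num
        rw [hitems, List.foldl_append, List.foldl_cons, List.foldl_nil, ih]
        rfl

-- each merge step of B's port is pvUpdN (setdefault elimination)
theorem mergeStep_eq (q : PySem.Dict String (PySem.Dict String Int))
    (e : (String × String) × Int) : pvMergeStep q e = pvUpdN q e.1.1 e.1.2 e.2 := by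
  by_cases hc : q.contains e.1.1 = true
  · rw [pvMergeStep, PySem.Dict.setdefault_of_contains _ _ hc]
    rfl
  · have hcf : q.contains e.1.1 = false := by simpa using hc
    simp [pvMergeStep, pvUpdN, PySem.Dict.setdefault_of_not_contains _ _ hcf,
      PySem.Dict.getD_insert_self, PySem.Dict.insert_insert_self,
      PySem.Dict.getD_of_not_contains _ _ hcf, PySem.Dict.getD_empty]

-- B's pair stream, folded with pvUpd from index k, is pvRef on the remaining tokens
theorem B_core (toks : List String) (e : Nat) (m : Nat) :
    ∀ (k : Nat) (p : PySem.Dict String (PySem.Dict String Int)),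
      k + m = toks.length → e ≤ k →
      ((PySem.List.pyRange (k : Int) (toks.length : Int)).map
          (pvPairB toks ((e : Int) + 1))).foldl (fun q x => pvUpd q x.1 x.2) p
        = pvRef (toks.drop k) ((toks.drop (k - e)).take e) p := by
  induction m with
  | zero =>
      intro k p hk _
      have : ¬ ((k : Int) < (toks.length : Int)) := by omega
      rw [PySem.List.pyRange_of_pos _ _ (by norm_num : (0:Int) < 1), if_neg this]
      simp [pvRef, List.drop_eq_nil_of_le (by omega : toks.length ≤ k)]
  | succ m ih =>
      intro k p hk he
      have hkn : k < toks.length := by omega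
      rw [PySem.List.pyRange_one_cons (by exact_mod_cast hkn), List.map_cons, List.foldl_cons]
      have hstep : pvUpd p (pvPairB toks ((e : Int) + 1) (k : Int)).1
            (pvPairB toks ((e : Int) + 1) (k : Int)).2
          = pvUpd p (get_string ((toks.drop (k - e)).take e)) toks[k] := by
        have hslice : PySem.List.slice toks (some ((k : Int) - ((e : Int) + 1) + 1)) (some (k : Int))
            = (toks.drop (k - e)).take e := by
          have : (k : Int) - ((e : Int) + 1) + 1 = ((k - e : Nat) : Int) := by push_cast; omega
          rw [this, PySem.List.slice_natCast]
          have h2 : k - (k - e) = e := by omega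
          rw [h2]
        rw [pvPairB, hslice, PySem.List.pyGetD_natCast,
            List.getD_eq_getElem?_getD, List.getElem?_eq_getElem hkn, Option.getD_some,
            ← get_string_eq_join]
      rw [hstep, List.drop_eq_getElem_cons hkn, pvRef]
      have hwin : ((toks.drop (k - e)).take e ++ [toks[k]]).drop 1
          = (toks.drop (k + 1 - e)).take e := by
        have hke : k - e + e = k := by omega
        have h1 : (toks.drop (k - e)).take e ++ [toks[k]] = (toks.drop (k - e)).take (e + 1) := by
          rw [List.take_add_one, List.getElem?_drop, hke, List.getElem?_eq_getElem hkn]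
          rfl
        have h4 : k - e + 1 = k + 1 - e := by omega
        rw [h1, List.drop_take, Nat.add_sub_cancel, List.drop_drop, h4]
      rw [hwin]
      have hcast : (k : Int) + 1 = ((k + 1 : Nat) : Int) := by push_cast; ring
      rw [hcast]
      exact ih (k + 1) _ (by omega) (by omega)

theorem calculate_n_tokens_spec_aux (depth : Int) (toks : List String)
    (probabilities : List (String × List (String × Int))) :
    calculate_n_tokens depth toks probabilities
      = calculate_n_tokens_alt depth toks probabilities := by
  have hmerge : pvMergeStep = (fun q (e : (String × String) × Int) =>
      pvUpdN q e.1.1 e.1.2 e.2) := funext fun q => funext fun e => mergeStep_eq q e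
  show pvFromDict (toks.foldl (pvStepA depth) ([], pvToDict probabilities)).2
      = pvFromDict (((((PySem.List.pyRange ((if depth > 1 then depth else 1) - 1)
          (toks.length : Int)).map (pvPairB toks (if depth > 1 then depth else 1))).foldl
            pvCountStep PySem.Dict.empty).items).foldl pvMergeStep (pvToDict probabilities))
  rw [hmerge, merge_cnt]
  set d : Int := if depth > 1 then depth else 1 with hd
  set e : Nat := (d - 1).toNat with he
  have hd1 : 1 ≤ d := by rw [hd]; split <;> omega
  have hE : (e : Int) = d - 1 := by omega
  have h1 : d - 1 = (e : Int) := hE.symm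
  have h2 : d = (e : Int) + 1 := by omega
  rw [h1, h2]
  congr 1
  by_cases hdp : 1 < depth
  · -- depth ≥ 2: the window really fills over the first e = depth-1 tokens
    have hdd : d = depth := by rw [hd, if_pos hdp]
    by_cases hn : e ≤ toks.length
    · -- enough tokens: phase 1 fills the window, then both loops are pvRef
      rw [B_core toks e (toks.length - e) e (pvToDict probabilities) (by omega) le_rfl]
      conv_lhs => rw [← List.take_append_drop e toks]
      rw [List.foldl_append]
      have hph : (toks.take e).foldl (pvStepA depth) ([], pvToDict probabilities)
          = (([] : List String) ++ toks.take e, pvToDict probabilities) := by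
        apply A_phase1
        have hl : (toks.take e).length = e := by rw [List.length_take]; omega
        rw [hl]
        simp only [List.length_nil]
        omega
      rw [hph, List.nil_append]
      rw [A_core depth (toks.drop e) (toks.take e) (pvToDict probabilities)
        (by rw [List.length_take]; push_cast; omega)]
      rw [Nat.sub_self, List.drop_zero]
    · -- fewer than e tokens: A never fires its body, B's pair stream is empty
      push_neg at hn
      have hB : ¬ ((e : Int) < (toks.length : Int)) := by omega
      rw [PySem.List.pyRange_of_pos _ _ (by norm_num : (0:Int) < 1), if_neg hB]
      simp only [List.range_zero, List.map_nil, List.foldl_nil]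
      have hA : toks.foldl (pvStepA depth) ([], pvToDict probabilities)
          = (([] : List String) ++ toks, pvToDict probabilities) := by
        apply A_phase1
        simp only [List.length_nil]
        omega
      rw [hA]
  · -- depth ≤ 1: the guard is never true, e = 0, the window stays empty
    have he0 : e = 0 := by omega
    simp only [he0]
    rw [B_core toks 0 toks.length 0 (pvToDict probabilities) (by omega) (by omega)]
    rw [A_core depth toks [] (pvToDict probabilities) (by simp; omega)]
    simp

-- ===== VERDICT (by name: the statement is the Claim_ definition above) =====
theorem calculate_n_tokens_spec : Claim_equal_calculate_n_tokens := by
  intro depth toks probabilities _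
  exact calculate_n_tokens_spec_aux depth toks probabilities
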